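-- pv_equiv track=rewrite | github.com/pypi-data/pypi-mirror-233 | packages/fmtutil/fmtutil-0.3.0-py3-none-any.whl/fmtutil/formatter.py | __extract_from_word_with_short
-- ===== SOURCE A (Python) =====
-- from itertools import tee, zip_longest
-- from typing import (
--     Any,
--     Callable,
--     Dict,
--     List,
--     NoReturn,
--     Optional,
--     Tuple,
--     Type,
--     TypedDict,
--     TypeVar,
--     Union,
--     final,  # docs: https://github.com/python/mypy/issues/9953
-- )
--
-- def __extract_from_word_with_short(
--     word: str,
--     shorts: List[str],
-- ) -> List[str]:
--     """Return list of name that was extracted from word by list of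
--     shortnames.
--     """
--     idx: int = 0
--     rs: List[int] = []
--     for s in shorts:
--         idx += word[idx:].index(s)
--         rs.append(idx)
--     start, end = tee(rs, 2)
--     # Move index of end for split with correct end of word index.
--     next(end)
--     return [word[i:j] for i, j in zip_longest(start, end)]
-- ===== SOURCE B (Python) =====
-- def __extract_from_word_with_short(word, shorts):
--     """Structural recursion over shorts carrying the remaining SUFFIX string:
--     no index arithmetic, no positions list, no tee/zip_longest pairing."""
--     first, *rest = shorts
--
--     def go(suffix, rest):
--         if not rest:
--             return [suffix]
--         j = suffix.index(rest[0])
--         return [suffix[:j]] + go(suffix[j:], rest[1:])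
--
--     return go(word[word.index(first):], rest)
-- ===== Notes on version B (the rewrite author's own statement) =====
-- stated objective: simpler
-- what changed: B replaces A's two-phase index pipeline (build a list of absolute match positions with a moving .index, then pair it with a shifted copy via tee/zip_longest and slice) by structural recursion over shorts that carries the remaining suffix STRING: each step searches in the suffix, emits its head part and recurses on its tail part, so the positions list, the index arithmetic and the zip pairing all disappear. Pre_ excludes only inputs where A raises: empty shorts (StopIteration) and a short the moving search does not find (ValueError); B raises on the same inputs.
import Mathlib
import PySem

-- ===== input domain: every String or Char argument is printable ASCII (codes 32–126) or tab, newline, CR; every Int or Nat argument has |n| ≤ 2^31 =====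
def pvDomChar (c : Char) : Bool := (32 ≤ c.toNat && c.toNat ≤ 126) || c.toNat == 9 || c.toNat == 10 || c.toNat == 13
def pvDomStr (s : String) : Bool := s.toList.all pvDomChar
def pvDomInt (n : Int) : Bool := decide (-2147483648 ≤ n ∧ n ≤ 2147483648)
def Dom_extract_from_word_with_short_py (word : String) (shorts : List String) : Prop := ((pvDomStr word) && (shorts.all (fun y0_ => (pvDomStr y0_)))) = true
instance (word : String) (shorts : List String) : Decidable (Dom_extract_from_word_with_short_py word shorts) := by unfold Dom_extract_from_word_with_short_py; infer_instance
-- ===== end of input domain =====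

-- B replaces A's two-phase index pipeline (positions list + tee/zip_longest pairing) by
-- structural recursion over shorts carrying the remaining suffix string; objective: simpler.


-- ===== PORT A =====
-- A: build the list rs of match positions with a moving '.index' search, then pair rs
-- with its one-step-shifted copy (tee + next + zip_longest) and slice the word.
def pvZipLong : List Int → List Int → List (Int × Option Int)
  | [], _ => []
  | i :: is, [] => (i, none) :: pvZipLong is []
  | i :: is, j :: js => (i, some j) :: pvZipLong is js

def pvStepA (cs : List Char) (st : Option (Int × List Int)) (s : String) : Option (Int × List Int) :=
  match st with
  | none => none
  | some (idx, rs) =>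
    let f := PySem.Chars.find (PySem.List.slice cs (some idx) none) s.toList
    if f = -1 then none else some (idx + f, rs ++ [idx + f])

def extract_from_word_with_short_py (word : String) (shorts : List String) : List String :=
  let cs := word.toList
  match shorts.foldl (pvStepA cs) (some (0, [])) with
  | none => []                -- ValueError in Python: excluded by Pre_
  | some (_, rs) =>
    match rs with
    | [] => []                -- StopIteration in Python (empty shorts): excluded by Pre_
    | _ :: _ =>
      (pvZipLong rs rs.tail).map (fun p => String.ofList (PySem.List.slice cs (some p.1) p.2))

-- ===== PORT B =====
-- B: structural recursion over the remaining shorts carrying the remaining SUFFIX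
-- (a list of chars): search in the suffix, emit its head part, recurse on its tail part.
def pvGoB : List String → List Char → List String
  | [], suffix => [String.ofList suffix]
  | s :: rest, suffix =>
    let j := PySem.Chars.find suffix s.toList
    if j = -1 then []          -- ValueError in Python: excluded by Pre_
    else String.ofList (PySem.List.slice suffix none (some j)) ::
         pvGoB rest (PySem.List.slice suffix (some j) none)

def extract_from_word_with_short_py_alt (word : String) (shorts : List String) : List String :=
  match shorts with
  | [] => []                  -- ValueError on 'first, *rest = shorts' in Python: excluded by Pre_
  | first :: rest =>
    let cs := word.toList
    let i := PySem.Chars.find cs first.toList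
    if i = -1 then []         -- ValueError in Python: excluded by Pre_
    else pvGoB rest (PySem.List.slice cs (some i) none)

-- ===== PRECONDITION & SPEC =====
-- Pre_ excludes exactly the inputs where A raises: empty shorts (StopIteration from
-- next(end)) and a short not occurring in the remaining word (ValueError from .index).
-- pvChainOk says: each short OCCURS in the word remaining from the previous match
-- position (membership 'isIn' on a suffix); it computes no output of either program.
def pvChainOk (cs : List Char) : List String → Bool
  | [] => true
  | s :: rest =>
    PySem.Chars.isIn s.toList cs &&
      pvChainOk (cs.drop (PySem.Chars.find cs s.toList).toNat) rest

def Pre_extract_from_word_with_short_py (word : String) (shorts : List String) : Prop :=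
  shorts ≠ [] ∧ pvChainOk word.toList shorts = true

instance (word : String) (shorts : List String) : Decidable (Pre_extract_from_word_with_short_py word shorts) := by
  unfold Pre_extract_from_word_with_short_py; infer_instance

def pvWitness_extract_from_word_with_short_py : String × List String := ("abcbc", ["a", "c"])

def Spec_extract_from_word_with_short_py (word : String) (shorts : List String) (out : List String) : Prop := out = extract_from_word_with_short_py_alt word shorts
instance (word : String) (shorts : List String) (out : List String) : Decidable (Spec_extract_from_word_with_short_py word shorts out) := by unfold Spec_extract_from_word_with_short_py; infer_instance

-- ===== CLAIM (what is proved, stated in full; the proofs are below) =====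
def Claim_equal_extract_from_word_with_short_py : Prop := ∀ (word : String) (shorts : List String), Dom_extract_from_word_with_short_py word shorts → Pre_extract_from_word_with_short_py word shorts → Spec_extract_from_word_with_short_py word shorts (extract_from_word_with_short_py word shorts)

-- ===== LEMMAS AND PROOFS =====

-- Proof-side absolute form of the chain condition: the greedy search of the ports,
-- with an absolute index into cs.
def pvChainA (cs : List Char) (idx : Int) : List String → Bool
  | [] => true
  | s :: rest =>
    let f := PySem.Chars.find (PySem.List.slice cs (some idx) none) s.toList
    if f = -1 then false else pvChainA cs (idx + f) rest

-- The relative membership condition pvChainOk equals the absolute greedy pvChainA.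
theorem pvChainA_eq (cs : List Char) : ∀ (shorts : List String) (idx : Int), 0 ≤ idx →
    pvChainA cs idx shorts = pvChainOk (cs.drop idx.toNat) shorts := by
  intro shorts
  induction shorts with
  | nil => intro idx _; rfl
  | cons s rest ih =>
    intro idx hidx
    unfold pvChainA pvChainOk
    rw [PySem.List.slice_from cs hidx]
    by_cases hf : PySem.Chars.find (cs.drop idx.toNat) s.toList = -1
    · rw [hf]
      have : PySem.Chars.isIn s.toList (cs.drop idx.toNat) = false := by
        rw [PySem.Chars.isIn_eq_false_iff]
        exact (not_iff_not.mpr (PySem.Chars.find_ne_neg_one_iff _ _)).mp (by simp [hf])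
      simp [this]
    · have hf0 : 0 ≤ PySem.Chars.find (cs.drop idx.toNat) s.toList := by
        have := PySem.Chars.neg_one_le_find (cs.drop idx.toNat) s.toList
        omega
      have hin : PySem.Chars.isIn s.toList (cs.drop idx.toNat) = true := by
        rw [PySem.Chars.isIn_iff_infix]
        exact (PySem.Chars.find_ne_neg_one_iff _ _).mp hf
      simp only [hf, if_false, hin, Bool.true_and]
      rw [ih _ (by omega)]
      congr 1
      rw [List.drop_drop]
      congr 1
      omega

-- Reference segments produced from position `prev` by the chain `rest`.
def pvSegs (cs : List Char) (prev : Int) : List String → List String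
  | [] => [String.ofList (PySem.List.slice cs (some prev) none)]
  | s :: rest =>
    let f := PySem.Chars.find (PySem.List.slice cs (some prev) none) s.toList
    String.ofList (PySem.List.slice cs (some prev) (some (prev + f))) :: pvSegs cs (prev + f) rest

-- Reference positions: the rs entries A appends from position `idx` onwards.
def pvPos (cs : List Char) (idx : Int) : List String → List Int
  | [] => []
  | s :: rest =>
    let f := PySem.Chars.find (PySem.List.slice cs (some idx) none) s.toList
    (idx + f) :: pvPos cs (idx + f) rest

-- Final position after a successful chain.
def pvLast (cs : List Char) (idx : Int) : List String → Int
  | [] => idx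
  | s :: rest =>
    let f := PySem.Chars.find (PySem.List.slice cs (some idx) none) s.toList
    pvLast cs (idx + f) rest

-- A's fold, on a successful chain, appends exactly pvPos.
theorem pvFoldA_eq (cs : List Char) : ∀ (shorts : List String) (idx : Int) (rs : List Int),
    pvChainA cs idx shorts = true →
    shorts.foldl (pvStepA cs) (some (idx, rs))
      = some (pvLast cs idx shorts, rs ++ pvPos cs idx shorts) := by
  intro shorts
  induction shorts with
  | nil => intro idx rs _; simp [pvLast, pvPos]
  | cons s rest ih =>
    intro idx rs h
    unfold pvChainA at h
    by_cases hf : PySem.Chars.find (PySem.List.slice cs (some idx) none) s.toList = -1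
    · simp [hf] at h
    · simp only [hf, if_false] at h
      have hstep : pvStepA cs (some (idx, rs)) s =
          some (idx + PySem.Chars.find (PySem.List.slice cs (some idx) none) s.toList,
            rs ++ [idx + PySem.Chars.find (PySem.List.slice cs (some idx) none) s.toList]) := by
        simp [pvStepA, if_neg hf]
      rw [List.foldl_cons, hstep, ih _ _ h]
      simp [pvLast, pvPos]

-- The zip_longest pairing of positions, sliced, gives exactly the reference segments.
theorem pvZip_map (cs : List Char) : ∀ (rest : List String) (p0 : Int),
    pvChainA cs p0 rest = true →
    (pvZipLong (p0 :: pvPos cs p0 rest) (pvPos cs p0 rest)).map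
      (fun p => String.ofList (PySem.List.slice cs (some p.1) p.2)) = pvSegs cs p0 rest := by
  intro rest
  induction rest with
  | nil => intro p0 _; simp [pvPos, pvZipLong, pvSegs]
  | cons s r ih =>
    intro p0 h
    unfold pvChainA at h
    by_cases hf : PySem.Chars.find (PySem.List.slice cs (some p0) none) s.toList = -1
    · simp [hf] at h
    · simp only [hf, if_false] at h
      simp only [pvPos, pvSegs, pvZipLong, List.map_cons]
      exact congrArg _ (ih _ h)

-- B's suffix recursion, on a successful chain, computes the reference segments.
theorem pvGoB_eq (cs : List Char) : ∀ (rest : List String) (prev : Int), 0 ≤ prev →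
    pvChainA cs prev rest = true →
    pvGoB rest (PySem.List.slice cs (some prev) none) = pvSegs cs prev rest := by
  intro rest
  induction rest with
  | nil => intro prev _ _; simp [pvGoB, pvSegs]
  | cons s r ih =>
    intro prev hprev h
    unfold pvChainA at h
    by_cases hf : PySem.Chars.find (PySem.List.slice cs (some prev) none) s.toList = -1
    · simp [hf] at h
    · simp only [hf, if_false] at h
      have hf0 : 0 ≤ PySem.Chars.find (PySem.List.slice cs (some prev) none) s.toList := by
        have := PySem.Chars.neg_one_le_find (PySem.List.slice cs (some prev) none) s.toList
        omega
      set f := PySem.Chars.find (PySem.List.slice cs (some prev) none) s.toList with hfdef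
      unfold pvGoB pvSegs
      rw [← hfdef]
      simp only [hf, if_false]
      have hnat : (prev + f).toNat - prev.toNat = f.toNat := by omega
      congr 1
      · -- head segment: (cs[prev:])[:f] = cs[prev:prev+f]
        rw [PySem.List.slice_from cs hprev, PySem.List.slice_to _ hf0,
            PySem.List.slice_toNat cs hprev (by omega), hnat]
      · -- tail: (cs[prev:])[f:] = cs[prev+f:], then IH
        rw [PySem.List.slice_from cs hprev, PySem.List.slice_from _ hf0, List.drop_drop]
        have : prev.toNat + f.toNat = (prev + f).toNat := by omega
        rw [this, ← PySem.List.slice_from cs (a := prev + f) (by omega)]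
        exact ih _ (by omega) h

-- ===== VERDICT (by name: the statement is the Claim_ definition above) =====
theorem extract_from_word_with_short_py_spec : Claim_equal_extract_from_word_with_short_py := by
  intro word shorts _ hPre
  obtain ⟨hne, hchain⟩ := hPre
  obtain ⟨first, rest, rfl⟩ : ∃ f r, shorts = f :: r := by
    cases shorts with
    | nil => exact absurd rfl hne
    | cons a b => exact ⟨a, b, rfl⟩
  unfold Spec_extract_from_word_with_short_py
  unfold extract_from_word_with_short_py extract_from_word_with_short_py_alt
  have hdrop : PySem.List.slice word.toList (some 0) none = word.toList := by
    simp [PySem.List.slice_from word.toList (a := 0) le_rfl]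
  have hchain : pvChainA word.toList 0 (first :: rest) = true := by
    rw [pvChainA_eq word.toList (first :: rest) 0 le_rfl]
    simpa using hchain
  unfold pvChainA at hchain
  rw [hdrop] at hchain
  by_cases hf : PySem.Chars.find word.toList first.toList = -1
  · simp [hf] at hchain
  · simp only [hf, if_false, zero_add] at hchain
    have hf0 : 0 ≤ PySem.Chars.find word.toList first.toList := by
      have := PySem.Chars.neg_one_le_find word.toList first.toList
      omega
    have hstep : pvStepA word.toList (some (0, [])) first =
        some (PySem.Chars.find word.toList first.toList,
          [PySem.Chars.find word.toList first.toList]) := by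
      simp [pvStepA, hdrop, if_neg hf]
    simp only [List.foldl_cons, hstep]
    rw [pvFoldA_eq word.toList rest _ _ hchain]
    simp only [if_neg hf]
    rw [pvGoB_eq word.toList rest _ hf0 hchain]
    simp only [List.singleton_append, List.tail_cons]
    exact pvZip_map word.toList rest _ hchain
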